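-- pv_equiv track=rewrite | github.com/noordenbos/TCR_BCR_constant_xenium | consensus_cli.py | merge_ref_alignments
-- ===== SOURCE A (Python) =====
-- from typing import Dict, Iterable, List, Optional, Sequence, Tuple
--
-- def merge_ref_alignments(
--     current_ref: str,
--     new_ref: str,
--     existing_rows: Dict[str, str],
--     new_row: str,
-- ) -> Tuple[str, Dict[str, str], str]:
--     i = 0
--     j = 0
--     merged_ref: List[str] = []
--     expanded_existing: Dict[str, List[str]] = {k: [] for k in existing_rows}
--     expanded_new_row: List[str] = []
--
--     while i < len(current_ref) or j < len(new_ref):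
--         a = current_ref[i] if i < len(current_ref) else None
--         b = new_ref[j] if j < len(new_ref) else None
--
--         consume_old = False
--         consume_new = False
--
--         if a is not None and b is not None and a == b:
--             consume_old = True
--             consume_new = True
--             merged_ref.append(a)
--         elif a == "-" and b != "-":
--             consume_old = True
--             merged_ref.append("-")
--         elif b == "-" and a != "-":
--             consume_new = True
--             merged_ref.append("-")
--         elif a is None and b is not None:
--             consume_new = True
--             merged_ref.append(b)
--         elif b is None and a is not None:
--             consume_old = True
--             merged_ref.append(a)
--         else:
--             consume_old = True
--             consume_new = True
--             merged_ref.append(a if a is not None else (b if b is not None else "-"))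
--
--         for name, row in existing_rows.items():
--             if consume_old and i < len(row):
--                 expanded_existing[name].append(row[i])
--             else:
--                 expanded_existing[name].append("-")
--
--         if consume_new and j < len(new_row):
--             expanded_new_row.append(new_row[j])
--         else:
--             expanded_new_row.append("-")
--
--         if consume_old:
--             i += 1
--         if consume_new:
--             j += 1
--
--     return "".join(merged_ref), {k: "".join(v) for k, v in expanded_existing.items()}, "".join(expanded_new_row)
-- ===== SOURCE B (Python) =====
-- def merge_ref_alignments(current_ref, new_ref, existing_rows, new_row):
--     # Stack-based rewrite: all inputs are reversed once and consumed by pop()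
--     # from the end; no index arithmetic anywhere.  The five-way elif chain is
--     # replaced by two boolean formulas deciding which stacks to pop.
--     ra = list(reversed(current_ref))
--     rb = list(reversed(new_ref))
--     names = list(existing_rows)
--     stacks = [list(reversed(existing_rows[n])) for n in names]
--     rnr = list(reversed(new_row))
--     merged = []
--     cols = [[] for _ in names]
--     nrcol = []
--     while ra or rb:
--         if not ra:
--             co, cn, c = False, True, rb[-1]
--         elif not rb:
--             co, cn, c = True, False, ra[-1]
--         else:
--             a, b = ra[-1], rb[-1]
--             co = a == "-" or b != "-"
--             cn = b == "-" or a != "-"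
--             c = "-" if (a == "-") != (b == "-") else a
--         merged.append(c)
--         for st, col in zip(stacks, cols):
--             col.append(st.pop() if co and st else "-")
--         nrcol.append(rnr.pop() if cn and rnr else "-")
--         if co:
--             ra.pop()
--         if cn:
--             rb.pop()
--     return ("".join(merged),
--             {n: "".join(col) for n, col in zip(names, cols)},
--             "".join(nrcol))
-- ===== Notes on version B (the rewrite author's own statement) =====
-- stated objective: alternative
-- what changed: B replaces A's index-pointer merge (i/j counters, row[i] lookups, five-way elif chain) by stack consumption: every input string is reversed once into a stack, each step pops characters off the relevant stacks, and the branch chain is replaced by two boolean formulas (consume_old = a=='-' or b!='-', consume_new = b=='-' or a!='-') plus an xor for the merged gap character.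
import Mathlib
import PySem

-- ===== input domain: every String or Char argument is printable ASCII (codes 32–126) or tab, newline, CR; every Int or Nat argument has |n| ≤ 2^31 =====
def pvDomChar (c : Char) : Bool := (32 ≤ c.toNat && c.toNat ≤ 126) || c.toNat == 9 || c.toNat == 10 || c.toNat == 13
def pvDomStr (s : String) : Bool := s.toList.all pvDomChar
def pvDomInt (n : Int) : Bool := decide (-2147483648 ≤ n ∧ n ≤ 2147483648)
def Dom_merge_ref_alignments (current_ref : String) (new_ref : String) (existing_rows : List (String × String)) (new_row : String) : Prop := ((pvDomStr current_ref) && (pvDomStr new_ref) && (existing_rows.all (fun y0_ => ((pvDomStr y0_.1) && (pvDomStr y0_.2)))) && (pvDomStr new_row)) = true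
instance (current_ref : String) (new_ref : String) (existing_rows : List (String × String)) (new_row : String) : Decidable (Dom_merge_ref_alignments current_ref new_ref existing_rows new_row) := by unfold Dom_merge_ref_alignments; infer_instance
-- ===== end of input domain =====

-- B consumes all inputs as sts (reversed once, popped per step) with boolean pop formulas
-- instead of A's index pointers and five-way elif chain (objective: alternative decomposition).

-- ===== PORT A =====
-- branch chain of A's while-body (same branch order as the Python elif chain)
def mraDecide (a b : Option Char) : Bool × Bool × Char :=
  if a ≠ none ∧ b ≠ none ∧ a = b then (true, true, a.getD '-')
  else if a = some '-' ∧ b ≠ some '-' then (true, false, '-')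
  else if b = some '-' ∧ a ≠ some '-' then (false, true, '-')
  else if a = none ∧ b ≠ none then (false, true, b.getD '-')
  else if b = none ∧ a ≠ none then (true, false, a.getD '-')
  else (true, true, a.getD (b.getD '-'))

-- A's while loop: fuel bounds the (terminating) iteration count; state = (i, j, merged, expanded rows, expanded new row)
def mergeA_loop (cur new : List Char) (rows : List (String × String)) (nr : List Char) :
    Nat → Nat → Nat → List Char → List (List Char) → List Char →
    List Char × List (List Char) × List Char
  | 0, _, _, merged, exp, enew => (merged, exp, enew)
  | fuel+1, i, j, merged, exp, enew =>
    if i < cur.length ∨ j < new.length then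
      mergeA_loop cur new rows nr fuel
        (if (mraDecide cur[i]? new[j]?).1 then i+1 else i)
        (if (mraDecide cur[i]? new[j]?).2.1 then j+1 else j)
        (merged ++ [(mraDecide cur[i]? new[j]?).2.2])
        (List.zipWith (fun (p : String × String) acc =>
          acc ++ [if (mraDecide cur[i]? new[j]?).1 = true ∧ i < p.2.toList.length
                  then (p.2.toList[i]?).getD '-' else '-']) rows exp)
        (enew ++ [if (mraDecide cur[i]? new[j]?).2.1 = true ∧ j < nr.length
                  then (nr[j]?).getD '-' else '-'])
    else (merged, exp, enew)

def merge_ref_alignments (current_ref : String) (new_ref : String) (existing_rows : List (String × String)) (new_row : String) : String × (List (String × String)) × String :=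
  let r := mergeA_loop current_ref.toList new_ref.toList existing_rows new_row.toList
             (current_ref.toList.length + new_ref.toList.length) 0 0 []
             (existing_rows.map (fun _ => [])) []
  (String.ofList r.1,
   (existing_rows.zip r.2.1).map (fun q => (q.1.1, String.ofList q.2)),
   String.ofList r.2.2)

-- ===== PORT B =====
-- B's while loop over sts.  Python reverses each string once and pops from the END;
-- a Lean list consumed at its HEAD is exactly such a stack, so `st.pop()` is `.tail`
-- and `st[-1]` is `.head` (exact model of Source B's reversed-list sts).
def mergeB_loop : Nat → List Char → List Char → List (List Char) → List Char →
    List Char → List (List Char) → List Char →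
    List Char × List (List Char) × List Char
  | 0, _, _, _, _, merged, cols, nrcol => (merged, cols, nrcol)
  | _+1, [], [], _, _, merged, cols, nrcol => (merged, cols, nrcol)
  | fuel+1, [], (y :: ys), sts, snr, merged, cols, nrcol =>
    -- co = False, cn = True, c = b
    mergeB_loop fuel [] ys
      (sts.map (fun st => if false then st.tail else st))
      (if true then snr.tail else snr)
      (merged ++ [y])
      (List.zipWith (fun st col => col ++ [if false && !st.isEmpty then st.headD '-' else '-']) sts cols)
      (nrcol ++ [if true && !snr.isEmpty then snr.headD '-' else '-'])
  | fuel+1, (x :: xs), [], sts, snr, merged, cols, nrcol =>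
    -- co = True, cn = False, c = a
    mergeB_loop fuel xs []
      (sts.map (fun st => if true then st.tail else st))
      (if false then snr.tail else snr)
      (merged ++ [x])
      (List.zipWith (fun st col => col ++ [if true && !st.isEmpty then st.headD '-' else '-']) sts cols)
      (nrcol ++ [if false && !snr.isEmpty then snr.headD '-' else '-'])
  | fuel+1, (x :: xs), (y :: ys), sts, snr, merged, cols, nrcol =>
    let co := (x == '-') || (y != '-')
    let cn := (y == '-') || (x != '-')
    let c := if (x == '-') != (y == '-') then '-' else x
    mergeB_loop fuel (if co then xs else x :: xs) (if cn then ys else y :: ys)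
      (sts.map (fun st => if co then st.tail else st))
      (if cn then snr.tail else snr)
      (merged ++ [c])
      (List.zipWith (fun st col => col ++ [if co && !st.isEmpty then st.headD '-' else '-']) sts cols)
      (nrcol ++ [if cn && !snr.isEmpty then snr.headD '-' else '-'])

def merge_ref_alignments_alt (current_ref : String) (new_ref : String) (existing_rows : List (String × String)) (new_row : String) : String × (List (String × String)) × String :=
  let r := mergeB_loop (current_ref.toList.length + new_ref.toList.length)
             current_ref.toList new_ref.toList
             (existing_rows.map (fun p => p.2.toList)) new_row.toList
             [] (existing_rows.map (fun _ => [])) []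
  (String.ofList r.1,
   (existing_rows.zip r.2.1).map (fun q => (q.1.1, String.ofList q.2)),
   String.ofList r.2.2)

-- ===== PRECONDITION & SPEC =====
def Spec_merge_ref_alignments (current_ref : String) (new_ref : String) (existing_rows : List (String × String)) (new_row : String) (out : String × (List (String × String)) × String) : Prop := out = merge_ref_alignments_alt current_ref new_ref existing_rows new_row
instance (current_ref : String) (new_ref : String) (existing_rows : List (String × String)) (new_row : String) (out : String × (List (String × String)) × String) : Decidable (Spec_merge_ref_alignments current_ref new_ref existing_rows new_row out) := by unfold Spec_merge_ref_alignments; infer_instance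

-- ===== CLAIM =====
def Claim_equal_merge_ref_alignments : Prop := ∀ (current_ref : String) (new_ref : String) (existing_rows : List (String × String)) (new_row : String), Dom_merge_ref_alignments current_ref new_ref existing_rows new_row → Spec_merge_ref_alignments current_ref new_ref existing_rows new_row (merge_ref_alignments current_ref new_ref existing_rows new_row)

-- ===== LEMMAS AND PROOFS =====
-- A's elif chain, on two present characters, equals B's boolean formulas
lemma decide_ss (x y : Char) : mraDecide (some x) (some y) =
    ((x == '-') || (y != '-'), (y == '-') || (x != '-'),
     if (x == '-') != (y == '-') then '-' else x) := by
  by_cases hx : x = '-' <;> by_cases hy : y = '-' <;> by_cases hxy : x = y <;>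
    simp_all [mraDecide]

lemma decide_sn (x : Char) : mraDecide (some x) none = (true, false, x) := by
  by_cases hx : x = '-' <;> simp [mraDecide, hx]

lemma decide_ns (y : Char) : mraDecide none (some y) = (false, true, y) := by
  by_cases hy : y = '-' <;> simp [mraDecide, hy]

lemma zipWith_map_left' {α β γ δ : Type} (f : β → γ → δ) (g : α → β) (l : List α) (l' : List γ) :
    List.zipWith f (l.map g) l' = List.zipWith (fun a c => f (g a) c) l l' := by
  induction l generalizing l' with
  | nil => rfl
  | cons a t ih => cases l' <;> simp [ih]

lemma ite_lt_flip {α : Type} (n m : Nat) (X Y : α) :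
    (if n < m then X else Y) = if m ≤ n then Y else X := by
  by_cases h : n < m
  · rw [if_pos h, if_neg (by omega)]
  · rw [if_neg h, if_pos (by omega)]

-- the invariant: A's pointer loop at (i, j) = B's stack loop on the corresponding suffixes
lemma loopAB (cur new : List Char) (rows : List (String × String)) (nr : List Char) :
    ∀ (fuel i j : Nat) (merged : List Char) (exp : List (List Char)) (enew : List Char),
      mergeA_loop cur new rows nr fuel i j merged exp enew
      = mergeB_loop fuel (cur.drop i) (new.drop j)
          (rows.map (fun p => p.2.toList.drop i)) (nr.drop j) merged exp enew := by
  intro fuel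
  induction fuel with
  | zero => intro i j merged exp enew; simp [mergeA_loop, mergeB_loop]
  | succ f ih =>
    intro i j merged exp enew
    have hic : cur[i]? = (cur.drop i).head? := List.head?_drop.symm
    have hjc : new[j]? = (new.drop j).head? := List.head?_drop.symm
    rcases hc : cur.drop i with _ | ⟨x, xs⟩ <;> rcases hn : new.drop j with _ | ⟨y, ys⟩
    · have h1 : cur.length ≤ i := List.drop_eq_nil_iff.mp hc
      have h2 : new.length ≤ j := List.drop_eq_nil_iff.mp hn
      simp [mergeA_loop, mergeB_loop, Nat.not_lt.mpr h1, Nat.not_lt.mpr h2]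
    · have hj : j < new.length := by
        by_contra h; rw [List.drop_eq_nil_iff.mpr (Nat.le_of_not_lt h)] at hn; cases hn
      have hys : new.drop (j+1) = ys := by rw [← List.tail_drop, hn]; rfl
      have ha : cur[i]? = none := by rw [hic, hc]; rfl
      have hb : new[j]? = some y := by rw [hjc, hn]; rfl
      simp only [mergeA_loop, mergeB_loop, hj, or_true, if_true, ha, hb, decide_ns]
      simp [ih, hc, hys, List.tail_drop, zipWith_map_left', Function.comp_def, ite_lt_flip]
    · have hi : i < cur.length := by
        by_contra h; rw [List.drop_eq_nil_iff.mpr (Nat.le_of_not_lt h)] at hc; cases hc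
      have hxs : cur.drop (i+1) = xs := by rw [← List.tail_drop, hc]; rfl
      have ha : cur[i]? = some x := by rw [hic, hc]; rfl
      have hb : new[j]? = none := by rw [hjc, hn]; rfl
      simp only [mergeA_loop, mergeB_loop, hi, true_or, if_true, ha, hb, decide_sn]
      simp [ih, hn, hxs, List.tail_drop, zipWith_map_left', Function.comp_def, ite_lt_flip]
    · have hi : i < cur.length := by
        by_contra h; rw [List.drop_eq_nil_iff.mpr (Nat.le_of_not_lt h)] at hc; cases hc
      have hj : j < new.length := by
        by_contra h; rw [List.drop_eq_nil_iff.mpr (Nat.le_of_not_lt h)] at hn; cases hn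
      have hxs : cur.drop (i+1) = xs := by rw [← List.tail_drop, hc]; rfl
      have hys : new.drop (j+1) = ys := by rw [← List.tail_drop, hn]; rfl
      have ha : cur[i]? = some x := by rw [hic, hc]; rfl
      have hb : new[j]? = some y := by rw [hjc, hn]; rfl
      simp only [mergeA_loop, mergeB_loop, hi, true_or, if_true, ha, hb, decide_ss]
      cases hco : ((x == '-') || (y != '-')) <;> cases hcn : ((y == '-') || (x != '-')) <;>
        simp [ih, hc, hn, hxs, hys, List.tail_drop, zipWith_map_left',
          Function.comp_def, ite_lt_flip]

-- ===== VERDICT =====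
theorem merge_ref_alignments_spec : Claim_equal_merge_ref_alignments := by
  intro current_ref new_ref existing_rows new_row _
  unfold Spec_merge_ref_alignments merge_ref_alignments merge_ref_alignments_alt
  rw [loopAB]
  simp
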